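-- pv_equiv track=rewrite | github.com/amolmishra23/leetcode_solutions | 2038-remove-colored-pieces-if-both-neighbors-are-the-same-color/2038-remove-colored-pieces-if-both-neighbors-are-the-same-color.py | winnerOfGame2
-- ===== SOURCE A (Python) =====
-- def winnerOfGame2(colors: str) -> bool:
--     """
--     logic is to find extra a,b (in the continous streak of 3)
--     And figure which has most extra in the end
--     """
--     a, curr_a = 0,0
--     b, curr_b = 0, 0
--
--     for c in colors:
--         if c=="A":
--             curr_a += 1
--             if curr_a >=3:
--                 a+=1
--             curr_b = 0
--         else:
--             curr_b += 1
--             if curr_b >=3: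
--                 b+=1
--             curr_a = 0
--
--     return a>b
-- ===== SOURCE B (Python) =====
-- def winnerOfGame2(colors: str) -> bool:
--     # sliding length-3 window count instead of streak counters
--     a = b = 0
--     for x, y, z in zip(colors, colors[1:], colors[2:]):
--         if x == y == z == 'A':
--             a += 1
--         elif x != 'A' and y != 'A' and z != 'A':
--             b += 1
--     return a > b
-- ===== Notes on version B (the rewrite author's own statement) =====
-- stated objective: alternative
-- what changed: Replaces the stateful streak counters with a sliding length-3 window scan that counts windows uniformly of Alice's color versus windows uniformly not hers, then compares the two counts.
import Mathlib
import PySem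

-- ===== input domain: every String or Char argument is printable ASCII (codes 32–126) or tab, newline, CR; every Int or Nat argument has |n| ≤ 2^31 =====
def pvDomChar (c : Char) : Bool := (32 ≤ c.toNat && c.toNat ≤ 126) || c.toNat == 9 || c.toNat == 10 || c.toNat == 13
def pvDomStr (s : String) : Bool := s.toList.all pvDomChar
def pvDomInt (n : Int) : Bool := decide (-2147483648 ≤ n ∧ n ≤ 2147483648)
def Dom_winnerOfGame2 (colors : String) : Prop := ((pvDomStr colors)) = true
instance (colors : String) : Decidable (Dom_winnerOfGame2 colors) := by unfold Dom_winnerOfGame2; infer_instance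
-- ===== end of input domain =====

-- B replaces A's streak counters with a sliding length-3 window scan; same O(n) cost, return value only.

-- ===== PORT A =====
-- A's loop: streak counters curr_a / curr_b, bumping a / b when a streak reaches 3.
def pvStepA (s : Int × Int × Int × Int) (c : Char) : Int × Int × Int × Int :=
  let (a, ca, b, cb) := s
  if c = 'A' then
    ((if ca + 1 ≥ 3 then a + 1 else a), ca + 1, b, 0)
  else
    (a, 0, (if cb + 1 ≥ 3 then b + 1 else b), cb + 1)

def winnerOfGame2 (colors : String) : Bool :=
  let st := colors.toList.foldl pvStepA (0, 0, 0, 0)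
  decide (st.1 > st.2.2.1)

-- ===== PORT B =====
-- B's loop over zip(colors, colors[1:], colors[2:]): structural recursion on overlapping triples.
def pvAltGo : List Char → Int × Int → Int × Int
  | x :: y :: z :: r, (a, b) =>
    if x = 'A' ∧ y = 'A' ∧ z = 'A' then pvAltGo (y :: z :: r) (a + 1, b)
    else if x ≠ 'A' ∧ y ≠ 'A' ∧ z ≠ 'A' then pvAltGo (y :: z :: r) (a, b + 1)
    else pvAltGo (y :: z :: r) (a, b)
  | _, s => s

def winnerOfGame2_alt (colors : String) : Bool :=
  let st := pvAltGo colors.toList (0, 0)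
  decide (st.1 > st.2)

-- ===== PRECONDITION & SPEC =====
def Spec_winnerOfGame2 (colors : String) (out : Bool) : Prop := out = winnerOfGame2_alt colors
instance (colors : String) (out : Bool) : Decidable (Spec_winnerOfGame2 colors out) := by unfold Spec_winnerOfGame2; infer_instance

-- ===== CLAIM (what is proved, stated in full; the proofs are below) =====
def Claim_equal_winnerOfGame2 : Prop := ∀ (colors : String), Dom_winnerOfGame2 colors → Spec_winnerOfGame2 colors (winnerOfGame2 colors)

-- ===== LEMMAS AND PROOFS =====

-- pure window counts (value of B's accumulators)
def cA : List Char → Int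
  | x :: y :: z :: r => (if x = 'A' ∧ y = 'A' ∧ z = 'A' then 1 else 0) + cA (y :: z :: r)
  | _ => 0

def cB : List Char → Int
  | x :: y :: z :: r => (if x ≠ 'A' ∧ y ≠ 'A' ∧ z ≠ 'A' then 1 else 0) + cB (y :: z :: r)
  | _ => 0

lemma pvAltGo_eq_aux : ∀ (n : Nat) (l : List Char), l.length ≤ n →
    ∀ a b : Int, pvAltGo l (a, b) = (a + cA l, b + cB l) := by
  intro n
  induction n with
  | zero =>
    intro l hl a b
    have : l = [] := List.eq_nil_of_length_eq_zero (Nat.le_zero.mp hl)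
    subst this; simp [pvAltGo, cA, cB]
  | succ n ih =>
    intro l hl a b
    match l with
    | [] => simp [pvAltGo, cA, cB]
    | [x] => simp [pvAltGo, cA, cB]
    | [x, y] => simp [pvAltGo, cA, cB]
    | x :: y :: z :: r =>
      have hlen : (y :: z :: r).length ≤ n := by simp at hl ⊢; omega
      by_cases h1 : x = 'A' ∧ y = 'A' ∧ z = 'A'
      · have h2 : ¬(x ≠ 'A' ∧ y ≠ 'A' ∧ z ≠ 'A') := fun h => h.1 h1.1
        simp only [pvAltGo, cA, cB, if_pos h1, if_neg h2]
        rw [ih _ hlen]; simp only [Prod.mk.injEq]; constructor <;> ring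
      · by_cases h2 : x ≠ 'A' ∧ y ≠ 'A' ∧ z ≠ 'A'
        · simp only [pvAltGo, cA, cB, if_neg h1, if_pos h2]
          rw [ih _ hlen]; simp only [Prod.mk.injEq]; constructor <;> ring
        · simp only [pvAltGo, cA, cB, if_neg h1, if_neg h2]
          rw [ih _ hlen]; simp only [Prod.mk.injEq]; constructor <;> ring

lemma pvAltGo_eq (l : List Char) (a b : Int) : pvAltGo l (a, b) = (a + cA l, b + cB l) :=
  pvAltGo_eq_aux l.length l le_rfl a b

-- value added to A's counters by the rest of the loop, given current streaks
def runA : Int → List Char → Int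
  | ca, c :: r => if c = 'A' then (if ca + 1 ≥ 3 then 1 else 0) + runA (ca + 1) r else runA 0 r
  | _, [] => 0

def runB : Int → List Char → Int
  | cb, c :: r => if c = 'A' then runB 0 r else (if cb + 1 ≥ 3 then 1 else 0) + runB (cb + 1) r
  | _, [] => 0

lemma fold_eq : ∀ (l : List Char) (a ca b cb : Int),
    (l.foldl pvStepA (a, ca, b, cb)).1 = a + runA ca l ∧
    (l.foldl pvStepA (a, ca, b, cb)).2.2.1 = b + runB cb l := by
  intro l
  induction l with
  | nil => intro a ca b cb; simp [runA, runB]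
  | cons c r ih =>
    intro a ca b cb
    simp only [List.foldl_cons, pvStepA, runA, runB]
    split_ifs with h1 h2
    · rcases ih (a + 1) (ca + 1) b 0 with ⟨hA, hB⟩
      exact ⟨by rw [hA]; ring, by rw [hB]⟩
    · rcases ih a (ca + 1) b 0 with ⟨hA, hB⟩
      exact ⟨by rw [hA]; simp, by rw [hB]⟩
    · rcases ih a 0 (b + 1) (cb + 1) with ⟨hA, hB⟩
      refine ⟨by rw [hA], by rw [hB]; ring⟩
    · rcases ih a 0 b (cb + 1) with ⟨hA, hB⟩
      refine ⟨by rw [hA], by rw [hB]; ring⟩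

def padA (ca : Int) : List Char := if ca ≤ 0 then [] else if ca = 1 then ['A'] else ['A', 'A']
def padB (cb : Int) : List Char := if cb ≤ 0 then [] else if cb = 1 then ['B'] else ['B', 'B']

lemma cA_cons (c : Char) (r : List Char) (hc : ¬ c = 'A') : cA (c :: r) = cA r := by
  match r with
  | [] => simp [cA]
  | [y] => simp [cA]
  | y :: z :: t => simp [cA, hc]

lemma cA_cons2 (x c : Char) (r : List Char) (hc : ¬ c = 'A') : cA (x :: c :: r) = cA (c :: r) := by
  match r with
  | [] => simp [cA]
  | z :: t => simp [cA, hc]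

lemma cB_cons (c : Char) (r : List Char) (hc : c = 'A') : cB (c :: r) = cB r := by
  match r with
  | [] => simp [cB]
  | [y] => simp [cB]
  | y :: z :: t => simp [cB, hc]

lemma cB_cons2 (x c : Char) (r : List Char) (hc : c = 'A') : cB (x :: c :: r) = cB (c :: r) := by
  match r with
  | [] => simp [cB]
  | z :: t => simp [cB, hc]

lemma runA_pad : ∀ (l : List Char) (ca : Int), 0 ≤ ca → runA ca l = cA (padA ca ++ l) := by
  intro l
  induction l with
  | nil =>
    intro ca _
    simp only [runA, List.append_nil]
    unfold padA; split_ifs <;> simp [cA]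
  | cons c r ih =>
    intro ca hca
    simp only [runA]
    by_cases hc : c = 'A'
    · subst hc
      simp only [if_pos (rfl : ('A':Char) = 'A')]
      rw [ih (ca + 1) (by omega)]
      rcases (by omega : ca = 0 ∨ ca = 1 ∨ 2 ≤ ca) with h | h | h
      · subst h; norm_num [padA]
      · subst h; norm_num [padA]
      · have h1 : padA ca = ['A', 'A'] := by unfold padA; split_ifs <;> first | omega | rfl
        have h2 : padA (ca + 1) = ['A', 'A'] := by unfold padA; split_ifs <;> first | omega | rfl
        rw [h1, h2]
        have : ca + 1 ≥ 3 := by omega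
        simp only [if_pos this]
        simp [cA]
    · simp only [if_neg hc]
      rw [ih 0 le_rfl, show padA 0 = [] by norm_num [padA], List.nil_append]
      rcases (by omega : ca = 0 ∨ ca = 1 ∨ 2 ≤ ca) with h | h | h
      · subst h; rw [show padA 0 = [] from by norm_num [padA], List.nil_append, cA_cons c r hc]
      · subst h; norm_num [padA]
        rw [cA_cons2 _ _ _ hc, cA_cons _ _ hc]
      · have h1 : padA ca = ['A', 'A'] := by unfold padA; split_ifs <;> first | omega | rfl
        rw [h1]
        show cA r = cA ('A' :: 'A' :: c :: r)
        rw [show cA ('A' :: 'A' :: c :: r) = (if ('A' : Char) = 'A' ∧ ('A' : Char) = 'A' ∧ c = 'A' then 1 else 0) + cA ('A' :: c :: r) from rfl]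
        simp [hc, cA_cons2 _ _ _ hc, cA_cons _ _ hc]

lemma cB_head (c d : Char) (r : List Char) (hc : ¬c = 'A') (hd : ¬d = 'A') :
    cB (c :: r) = cB (d :: r) := by
  match r with
  | [] => simp [cB]
  | [y] => simp [cB]
  | y :: z :: t => simp [cB, hc, hd]

lemma cB_head2 (x c d : Char) (r : List Char) (hc : ¬c = 'A') (hd : ¬d = 'A') :
    cB (x :: c :: r) = cB (x :: d :: r) := by
  match r with
  | [] => simp [cB]
  | z :: t => simp [cB, hc, hd, cB_head c d (z :: t) hc hd]

lemma runB_pad : ∀ (l : List Char) (cb : Int), 0 ≤ cb → runB cb l = cB (padB cb ++ l) := by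
  intro l
  induction l with
  | nil =>
    intro cb _
    simp only [runB, List.append_nil]
    unfold padB; split_ifs <;> simp [cB]
  | cons c r ih =>
    intro cb hcb
    simp only [runB]
    by_cases hc : c = 'A'
    · simp only [if_pos hc]
      rw [ih 0 le_rfl, show padB 0 = [] by norm_num [padB], List.nil_append]
      rcases (by omega : cb = 0 ∨ cb = 1 ∨ 2 ≤ cb) with h | h | h
      · subst h; rw [show padB 0 = [] from by norm_num [padB], List.nil_append, cB_cons c r hc]
      · subst h
        rw [show padB 1 = ['B'] from by norm_num [padB],
            show (['B'] ++ c :: r : List Char) = 'B' :: c :: r from rfl,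
            cB_cons2 _ _ _ hc, cB_cons _ _ hc]
      · have h1 : padB cb = ['B', 'B'] := by unfold padB; split_ifs <;> first | omega | rfl
        rw [h1]
        show cB r = cB ('B' :: 'B' :: c :: r)
        rw [show cB ('B' :: 'B' :: c :: r)
              = (if ('B' : Char) ≠ 'A' ∧ ('B' : Char) ≠ 'A' ∧ c ≠ 'A' then 1 else 0)
                + cB ('B' :: c :: r) from rfl,
            cB_cons2 _ _ _ hc, cB_cons _ _ hc]
        simp [hc]
    · simp only [if_neg hc]
      rw [ih (cb + 1) (by omega)]
      rcases (by omega : cb = 0 ∨ cb = 1 ∨ 2 ≤ cb) with h | h | h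
      · subst h
        rw [show padB (0 + 1) = ['B'] from by norm_num [padB],
            show padB 0 = [] from by norm_num [padB], List.nil_append,
            show (['B'] ++ r : List Char) = 'B' :: r from rfl,
            cB_head 'B' c r (by decide) hc]
        norm_num
      · subst h
        rw [show padB (1 + 1) = ['B', 'B'] from by norm_num [padB],
            show padB 1 = ['B'] from by norm_num [padB],
            show (['B', 'B'] ++ r : List Char) = 'B' :: 'B' :: r from rfl,
            show (['B'] ++ c :: r : List Char) = 'B' :: c :: r from rfl,
            cB_head2 'B' 'B' c r (by decide) hc]
        norm_num
      · have h1 : padB cb = ['B', 'B'] := by unfold padB; split_ifs <;> first | omega | rfl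
        have h2 : padB (cb + 1) = ['B', 'B'] := by unfold padB; split_ifs <;> first | omega | rfl
        rw [h1, h2, if_pos (by omega : cb + 1 ≥ 3),
            show (['B', 'B'] ++ r : List Char) = 'B' :: 'B' :: r from rfl,
            show (['B', 'B'] ++ c :: r : List Char) = 'B' :: 'B' :: c :: r from rfl,
            show cB ('B' :: 'B' :: c :: r)
              = (if ('B' : Char) ≠ 'A' ∧ ('B' : Char) ≠ 'A' ∧ c ≠ 'A' then 1 else 0)
                + cB ('B' :: c :: r) from rfl,
            cB_head2 'B' 'B' c r (by decide) hc]
        simp [hc]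

-- ===== VERDICT (by name: the statement is the Claim_ definition above) =====
theorem winnerOfGame2_spec : Claim_equal_winnerOfGame2 := by
  intro colors _
  unfold Spec_winnerOfGame2 winnerOfGame2 winnerOfGame2_alt
  have hf := fold_eq colors.toList 0 0 0 0
  have hA := runA_pad colors.toList 0 le_rfl
  have hB := runB_pad colors.toList 0 le_rfl
  simp [padA, padB] at hA hB
  simp [pvAltGo_eq, hf.1, hf.2, hA, hB]
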